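-- pv_equiv track=rewrite | github.com/sumukshashidhar/yourbench | yourbench/utils/cross_document_utils.py | _unrank_comb
-- ===== SOURCE A (Python) =====
-- import math
-- from typing import Any, Set, List, TypeVar, Sequence
--
-- def _unrank_comb(n: int, k: int, rank: int) -> List[int]:
--     """
--     Return the k-combination of [0, n) corresponding to the given rank
--     in colexicographic (colex) order.
--
--     Colexicographic order sorts combinations by increasing values of the
--     largest element, then second largest, and so on (i.e., right-to-left
--     significance).
--
--     Parameters
--     ----------
--     n : int
--         Size of the universe (exclusive upper bound of elements).
--     k : int
--         Size of each combination.
--     rank : int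
--         Integer in the range [0, C(n, k)) specifying the position of the combination
--         in colexicographic order.
--
--     Returns
--     -------
--     List[int]
--         A strictly increasing list of k integers in the range [0, n),
--         representing the rank-th combination in colex order.
--
--     Raises
--     ------
--     ValueError
--         If k is not in [0, n] or rank is not in [0, C(n, k)).
--     """
--     if not 0 <= k <= n:
--         raise ValueError(f"require 0 ≤ k ≤ n, got k={k}, n={n}")
--     max_rank = math.comb(n, k)
--     if not 0 <= rank < max_rank:
--         raise ValueError(f"rank must be in [0,{max_rank - 1}], got {rank}")
--
--     combo: List[int] = []
--     for i in range(k, 0, -1):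
--         # largest c such that C(c, i) ≤ rank (binary search)
--         lo, hi = i - 1, n - 1
--         while lo < hi:
--             mid = (lo + hi + 1) // 2
--             if math.comb(mid, i) <= rank:
--                 lo = mid
--             else:
--                 hi = mid - 1
--         combo.append(lo)
--         rank -= math.comb(lo, i)
--         n = lo  # next digit must be < current one
--     combo.reverse()
--     return combo
-- ===== SOURCE B (Python) =====
-- import math
-- from typing import List
--
--
-- def _unrank_comb(n: int, k: int, rank: int) -> List[int]:
--     """Colex unrank, with the inner search done by an incremental linear
--     descent (Pascal recurrence) instead of binary search with math.comb."""
--     if not 0 <= k <= n: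
--         raise ValueError(f"require 0 ≤ k ≤ n, got k={k}, n={n}")
--     max_rank = math.comb(n, k)
--     if not 0 <= rank < max_rank:
--         raise ValueError(f"rank must be in [0,{max_rank - 1}], got {rank}")
--
--     combo: List[int] = []
--     for i in range(k, 0, -1):
--         c = i - 1
--         v = 0  # C(c, i)
--         u = 1  # C(c + 1, i)
--         while c < n - 1 and u <= rank:
--             c += 1
--             v = u
--             u = u * (c + 1) // (c + 1 - i)
--         combo.append(c)
--         rank -= v
--         n = c
--     combo.reverse()
--     return combo
-- ===== Notes on version B (the rewrite author's own statement) =====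
-- stated objective: alternative
-- what changed: The per-digit binary search over math.comb probes is replaced by a linear descent that maintains the binomial coefficient incrementally via Pascal's recurrence (C(c+1,i)=C(c,i)*(c+1)//(c+1-i)), eliminating all math.comb calls inside the loop.
import Mathlib
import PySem

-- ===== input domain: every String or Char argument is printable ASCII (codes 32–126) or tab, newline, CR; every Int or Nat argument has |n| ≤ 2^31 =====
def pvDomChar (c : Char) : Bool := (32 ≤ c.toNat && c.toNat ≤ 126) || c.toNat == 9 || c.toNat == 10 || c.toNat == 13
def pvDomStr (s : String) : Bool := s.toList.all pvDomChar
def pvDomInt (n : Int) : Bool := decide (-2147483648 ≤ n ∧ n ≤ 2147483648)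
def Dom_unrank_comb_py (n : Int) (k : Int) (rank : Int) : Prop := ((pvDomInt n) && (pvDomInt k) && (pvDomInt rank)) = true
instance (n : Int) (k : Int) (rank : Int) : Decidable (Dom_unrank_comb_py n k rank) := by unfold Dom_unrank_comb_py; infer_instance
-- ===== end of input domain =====

-- B replaces A's per-digit binary search (a math.comb call per probe) with a linear descent
-- maintaining the binomial coefficient incrementally by Pascal's recurrence; same outer loop,
-- objective: alternative (not measurably faster), return value proved identical on Pre_.

-- ===== PORT A =====
-- math.comb, exact for 0 ≤ a and 0 ≤ b (every call reachable inside Pre_ has nonnegative args)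
def pyComb (a b : Int) : Int := (a.toNat.choose b.toNat : Int)

-- midpoint bounds of A's binary search, cited by bsA's decreasing_by
theorem pv_mid_bounds {lo hi : Int} (h : lo < hi) :
    lo + 1 ≤ PySem.Int.floordiv (lo + hi + 1) 2 ∧ PySem.Int.floordiv (lo + hi + 1) 2 ≤ hi := by
  have := PySem.Int.floordiv_two_mid_bounds (lo := lo + 1) (hi := hi) (by omega)
  have e : lo + 1 + hi = lo + hi + 1 := by ring
  rw [e] at this
  exact this

-- A's inner while-loop: binary search for the largest c with C(c,i) ≤ rank
def bsA (i rank lo hi : Int) : Int :=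
  if h : lo < hi then
    let mid := PySem.Int.floordiv (lo + hi + 1) 2
    if pyComb mid i ≤ rank then bsA i rank mid hi
    else bsA i rank lo (mid - 1)
  else lo
termination_by (hi - lo).toNat
decreasing_by
  · have := pv_mid_bounds h; omega
  · have := pv_mid_bounds h; omega

-- A's outer for-loop over i = k, k-1, …, 1; state (n, rank, combo)
def loopA (i n rank : Int) (combo : List Int) : List Int :=
  if h : 0 < i then
    let lo := bsA i rank (i - 1) (n - 1)
    loopA (i - 1) lo (rank - pyComb lo i) (combo ++ [lo])
  else combo
termination_by i.toNat
decreasing_by omega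

def unrank_comb_py (n : Int) (k : Int) (rank : Int) : List Int :=
  if 0 ≤ k ∧ k ≤ n then
    if 0 ≤ rank ∧ rank < pyComb n k then (loopA k n rank []).reverse
    else []  -- ValueError in Python: outside Pre_
  else []    -- ValueError in Python: outside Pre_

-- ===== PORT B =====
-- B's inner while-loop: linear descent keeping v = C(c,i), u = C(c+1,i); returns (c, v)
def scanB (i rank n c v u : Int) : Int × Int :=
  if h : c < n - 1 ∧ u ≤ rank then
    scanB i rank n (c + 1) u (PySem.Int.floordiv (u * (c + 2)) (c + 2 - i))
  else (c, v)
termination_by (n - 1 - c).toNat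
decreasing_by omega

-- B's outer for-loop, same state shape as A's
def loopB (i n rank : Int) (combo : List Int) : List Int :=
  if h : 0 < i then
    let p := scanB i rank n (i - 1) 0 1
    loopB (i - 1) p.1 (rank - p.2) (combo ++ [p.1])
  else combo
termination_by i.toNat
decreasing_by omega

def unrank_comb_py_alt (n : Int) (k : Int) (rank : Int) : List Int :=
  if 0 ≤ k ∧ k ≤ n then
    if 0 ≤ rank ∧ rank < pyComb n k then (loopB k n rank []).reverse
    else []
  else []

-- ===== PRECONDITION & SPEC =====
-- Pre_ = exactly where Python A returns (both ValueError guards pass)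
def Pre_unrank_comb_py (n : Int) (k : Int) (rank : Int) : Prop :=
  0 ≤ k ∧ k ≤ n ∧ 0 ≤ rank ∧ rank < pyComb n k
instance (n : Int) (k : Int) (rank : Int) : Decidable (Pre_unrank_comb_py n k rank) := by
  unfold Pre_unrank_comb_py; infer_instance

def pvWitness_unrank_comb_py : Int × Int × Int := (5, 2, 3)

def Spec_unrank_comb_py (n : Int) (k : Int) (rank : Int) (out : List Int) : Prop := out = unrank_comb_py_alt n k rank
instance (n : Int) (k : Int) (rank : Int) (out : List Int) : Decidable (Spec_unrank_comb_py n k rank out) := by unfold Spec_unrank_comb_py; infer_instance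

-- ===== CLAIM (what is proved, stated in full; the proofs are below) =====
def Claim_equal_unrank_comb_py : Prop := ∀ (n : Int) (k : Int) (rank : Int), Dom_unrank_comb_py n k rank → Pre_unrank_comb_py n k rank → Spec_unrank_comb_py n k rank (unrank_comb_py n k rank)

-- ===== LEMMAS AND PROOFS =====

theorem pyComb_mono (i : Int) {a b : Int} (h : a ≤ b) : pyComb a i ≤ pyComb b i := by
  unfold pyComb
  exact_mod_cast Nat.choose_le_choose i.toNat (Int.toNat_le_toNat h)

theorem pyComb_pred_self {i : Int} (h : 1 ≤ i) : pyComb (i - 1) i = 0 := by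
  unfold pyComb
  have h2 : (i - 1).toNat < i.toNat := by omega
  exact_mod_cast Nat.choose_eq_zero_of_lt h2

theorem pyComb_self (i : Int) : pyComb i i = 1 := by
  unfold pyComb; simp

theorem pyComb_pascal {c i : Int} (hc : 0 ≤ c) (hi : 1 ≤ i) :
    pyComb (c + 1) i = pyComb c (i - 1) + pyComb c i := by
  unfold pyComb
  have e1 : (c + 1).toNat = c.toNat + 1 := by omega
  have e2 : i.toNat = (i - 1).toNat + 1 := by omega
  rw [e1, e2, Nat.choose_succ_succ]
  push_cast; ring

theorem pyComb_step {i m : Int} (hi : 1 ≤ i) (him : i ≤ m) :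
    PySem.Int.floordiv (pyComb m i * (m + 1)) (m + 1 - i) = pyComb (m + 1) i := by
  have key : pyComb m i * (m + 1) = pyComb (m + 1) i * (m + 1 - i) := by
    unfold pyComb
    have h := Nat.choose_mul_succ_eq m.toNat i.toNat
    have e1 : (m + 1).toNat = m.toNat + 1 := by omega
    have e2 : ((m.toNat + 1 - i.toNat : Nat) : Int) = m + 1 - i := by omega
    have em : (m.toNat : Int) = m := by omega
    rw [e1]
    calc ((m.toNat.choose i.toNat : Nat) : Int) * (m + 1)
        = ((m.toNat.choose i.toNat * (m.toNat + 1) : Nat) : Int) := by push_cast [em]; ring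
      _ = (((m.toNat + 1).choose i.toNat * (m.toNat + 1 - i.toNat) : Nat) : Int) := by rw [h]
      _ = ((m.toNat + 1).choose i.toNat : Int) * (m + 1 - i) := by push_cast [e2]; ring
  have hd : (0 : Int) < m + 1 - i := by omega
  rw [key, PySem.Int.floordiv_eq_ediv_of_pos hd, Int.mul_ediv_cancel _ (by omega)]

-- "c is the largest value in [i-1, H] with C(c,i) ≤ rank" (H = current n - 1)
def PvIsMax (i rank H c : Int) : Prop :=
  i - 1 ≤ c ∧ c ≤ H ∧ pyComb c i ≤ rank ∧ (c = H ∨ rank < pyComb (c + 1) i)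

theorem PvIsMax_unique {i rank H c₁ c₂ : Int} (h₁ : PvIsMax i rank H c₁) (h₂ : PvIsMax i rank H c₂) :
    c₁ = c₂ := by
  obtain ⟨a1, b1, l1, r1⟩ := h₁
  obtain ⟨a2, b2, l2, r2⟩ := h₂
  rcases lt_trichotomy c₁ c₂ with h | h | h
  · rcases r1 with e | lt
    · omega
    · have := pyComb_mono i (show c₁ + 1 ≤ c₂ by omega)
      omega
  · exact h
  · rcases r2 with e | lt
    · omega
    · have := pyComb_mono i (show c₂ + 1 ≤ c₁ by omega)
      omega

theorem bsA_isMax (i rank H lo hi : Int) :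
    lo ≤ hi → i - 1 ≤ lo → pyComb lo i ≤ rank → hi ≤ H →
    (hi = H ∨ rank < pyComb (hi + 1) i) → PvIsMax i rank H (bsA i rank lo hi) := by
  fun_induction bsA i rank lo hi with
  | case1 lo hi h mid hcmb ih =>
    intro h1 h2 h3 h4 h5
    have hm := pv_mid_bounds h
    exact ih (by omega) (by omega) hcmb h4 h5
  | case2 lo hi h mid hcmb ih =>
    intro h1 h2 h3 h4 h5
    have hm := pv_mid_bounds h
    refine ih (by omega) h2 h3 (by omega) (Or.inr ?_)
    have e : mid - 1 + 1 = mid := by ring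
    rw [e]; omega
  | case3 lo hi h =>
    intro h1 h2 h3 h4 h5
    have e : lo = hi := by omega
    exact ⟨h2, by omega, h3, by rw [e]; exact h5⟩

theorem scanB_spec (i rank n c v u : Int) :
    1 ≤ i → i - 1 ≤ c → c ≤ n - 1 → v = pyComb c i → u = pyComb (c + 1) i →
    pyComb c i ≤ rank →
    PvIsMax i rank (n - 1) (scanB i rank n c v u).1 ∧
      (scanB i rank n c v u).2 = pyComb (scanB i rank n c v u).1 i := by
  fun_induction scanB i rank n c v u with
  | case1 c v u h ih =>
    intro hi h1 h2 hv hu hcr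
    refine ih hi (by omega) (by omega) hu ?_ (by omega)
    have e1 : (c : Int) + 2 = c + 1 + 1 := by ring
    rw [hu, e1]
    exact pyComb_step hi (by omega)
  | case2 c v u h =>
    intro hi h1 h2 hv hu hcr
    refine ⟨⟨h1, h2, hcr, ?_⟩, hv⟩
    by_cases hc : c = n - 1
    · exact Or.inl hc
    · exact Or.inr (by rw [← hu]; omega)

theorem inner_eq {i rank n : Int} (hi : 1 ≤ i) (hn : i ≤ n) (hr : 0 ≤ rank) :
    PvIsMax i rank (n - 1) (bsA i rank (i - 1) (n - 1)) ∧
      scanB i rank n (i - 1) 0 1 =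
        (bsA i rank (i - 1) (n - 1), pyComb (bsA i rank (i - 1) (n - 1)) i) := by
  have hzero : pyComb (i - 1) i = 0 := pyComb_pred_self hi
  have hA : PvIsMax i rank (n - 1) (bsA i rank (i - 1) (n - 1)) :=
    bsA_isMax i rank (n - 1) (i - 1) (n - 1) (by omega) le_rfl (by omega) le_rfl (Or.inl rfl)
  have hone : (1 : Int) = pyComb (i - 1 + 1) i := by
    have e : i - 1 + 1 = i := by ring
    rw [e, pyComb_self]
  have hB := scanB_spec i rank n (i - 1) 0 1 hi le_rfl (by omega) hzero.symm hone (by omega)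
  have hc : (scanB i rank n (i - 1) 0 1).1 = bsA i rank (i - 1) (n - 1) :=
    PvIsMax_unique hB.1 hA
  refine ⟨hA, ?_⟩
  have := hB.2
  rw [hc] at this
  exact Prod.ext hc this

theorem loop_eq : ∀ (j : Nat) (n rank : Int) (combo : List Int),
    0 ≤ rank → (j : Int) ≤ n → rank < pyComb n (j : Int) →
    loopA (j : Int) n rank combo = loopB (j : Int) n rank combo := by
  intro j
  induction j with
  | zero => intro n rank combo _ _ _; rw [loopA, loopB]; simp
  | succ j ih =>
    intro n rank combo hr hkn hrc
    have hi : (1 : Int) ≤ ((j + 1 : Nat) : Int) := by push_cast; omega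
    set i : Int := ((j + 1 : Nat) : Int) with hidef
    have hpos : 0 < i := by omega
    obtain ⟨hmax, hscan⟩ := inner_eq hi hkn hr
    rw [loopA, loopB]
    simp only [dif_pos hpos, hscan]
    set c := bsA i rank (i - 1) (n - 1) with hcdef
    obtain ⟨ha, hb, hl, hrr⟩ := hmax
    have hji : i - 1 = (j : Int) := by rw [hidef]; push_cast; ring
    have hlt : rank < pyComb (c + 1) i := by
      rcases hrr with e | lt
      · have : c + 1 = n := by omega
        rw [this]; exact hrc
      · exact lt
    have hpas : pyComb (c + 1) i = pyComb c (i - 1) + pyComb c i :=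
      pyComb_pascal (by omega) hi
    rw [hji]
    rw [hji] at hpas
    exact ih c (rank - pyComb c i) (combo ++ [c]) (by omega) (by omega) (by omega)

-- ===== VERDICT (by name: the statement is the Claim_ definition above) =====
theorem unrank_comb_py_spec : Claim_equal_unrank_comb_py := by
  intro n k rank _ hpre
  obtain ⟨hk, hkn, hr, hrc⟩ := hpre
  unfold Spec_unrank_comb_py unrank_comb_py unrank_comb_py_alt
  rw [if_pos (show (0:Int) ≤ k ∧ k ≤ n from ⟨hk, hkn⟩),
    if_pos (show (0:Int) ≤ rank ∧ rank < pyComb n k from ⟨hr, hrc⟩)]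
  have e : ((k.toNat : Nat) : Int) = k := Int.toNat_of_nonneg hk
  have := loop_eq k.toNat n rank [] hr (by omega) (by rw [e]; exact hrc)
  rw [e] at this
  rw [this, if_pos (show (0:Int) ≤ k ∧ k ≤ n from ⟨hk, hkn⟩),
    if_pos (show (0:Int) ≤ rank ∧ rank < pyComb n k from ⟨hr, hrc⟩)]
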